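-- pv_equiv track=rewrite | github.com/zuweiyang/solar-lead-intelligence-v2 | src/workflow_6_2_signal_personalization/signal_ranker.py | rank_signals
-- ===== SOURCE A (Python) =====
-- _TIERS: list[tuple[str, list[str]]] = [
--     ("project", [
--         "install", "rooftop", "solar farm", "solar project",
--         "completed", "commission", "deploy", "kw", "mw", "megawatt",
--     ]),
--     ("storage", [
--         "battery", "powerwall", "storage", "bess", "backup power",
--         "energy storage", "tesla", "enphase",
--     ]),
--     ("expansion", [
--         "hiring", "hire", "expanding", "expansion", "join our team",
--         "growing", "new office", "new location", "now serving",
--     ]),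
-- ]
--
-- def _tier(signal: str) -> int:
--     """Return tier index (lower = higher priority); 99 if no tier matches."""
--     lower = signal.lower()
--     for i, (_, keywords) in enumerate(_TIERS):
--         if any(kw in lower for kw in keywords):
--             return i
--     return 99
--
-- def _keyword_hits(signal: str) -> int:
--     """Count total keyword matches across all tiers (used as tiebreaker)."""
--     lower = signal.lower()
--     return sum(1 for _, keywords in _TIERS for kw in keywords if kw in lower)
--
-- def rank_signals(signals: list[str]) -> str | None:
--     """
--     Pick the single best signal for cold email personalization.
--
--     Returns the best signal string, or None if the list is empty.
--     """
--     if not signals: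
--         return None
--
--     # Filter out very short or uninformative signals
--     candidates = [s for s in signals if len(s.split()) >= 3]
--     if not candidates:
--         return signals[0]   # fallback to first if all are short
--
--     # Sort: tier ASC (best tier first), then keyword hits DESC (richest signal first)
--     ranked = sorted(candidates, key=lambda s: (_tier(s), -_keyword_hits(s)))
--     return ranked[0]
-- ===== SOURCE B (Python) =====
-- _TIERS: list[tuple[str, list[str]]] = [
--     ("project", [
--         "install", "rooftop", "solar farm", "solar project",
--         "completed", "commission", "deploy", "kw", "mw", "megawatt",
--     ]),
--     ("storage", [
--         "battery", "powerwall", "storage", "bess", "backup power",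
--         "energy storage", "tesla", "enphase",
--     ]),
--     ("expansion", [
--         "hiring", "hire", "expanding", "expansion", "join our team",
--         "growing", "new office", "new location", "now serving",
--     ]),
-- ]
--
-- def _key(sig: str):
--     """One pass over the keyword table: per-tier hit counts, then
--     (first tier with a hit or 99, -total hits)."""
--     lower = sig.lower()
--     counts = [sum(1 for kw in kws if kw in lower) for _, kws in _TIERS]
--     tier = next((i for i, c in enumerate(counts) if c > 0), 99)
--     return (tier, -sum(counts))
--
-- def rank_signals(signals: list[str]) -> str | None:
--     if not signals:
--         return None
--     # single pass: filter and running-minimum fused, key computed once per signal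
--     best = None
--     best_key = None
--     for s in signals:
--         if len(s.split()) >= 3:
--             k = _key(s)
--             if best is None or k < best_key:
--                 best, best_key = s, k
--     return best if best is not None else signals[0]
-- ===== Notes on version B (the rewrite author's own statement) =====
-- stated objective: simpler
-- what changed: replaces filter-then-sort-then-take-first with one fused linear pass that keeps the running best (signal, key) pair, computing each key once via a per-tier count list instead of separate _tier/_keyword_hits rescans
import Mathlib
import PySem

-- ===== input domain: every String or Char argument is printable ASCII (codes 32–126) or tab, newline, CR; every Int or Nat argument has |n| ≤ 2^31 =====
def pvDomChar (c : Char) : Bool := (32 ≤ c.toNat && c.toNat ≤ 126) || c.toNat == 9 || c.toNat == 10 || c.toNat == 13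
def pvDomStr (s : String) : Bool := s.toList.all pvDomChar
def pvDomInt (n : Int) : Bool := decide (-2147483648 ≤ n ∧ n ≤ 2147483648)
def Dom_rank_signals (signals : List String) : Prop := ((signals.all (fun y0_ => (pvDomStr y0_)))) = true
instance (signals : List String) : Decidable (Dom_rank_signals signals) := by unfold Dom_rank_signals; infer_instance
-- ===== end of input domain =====

-- B fuses A's filter + sort-then-take-first into one linear pass over the signals, keeping the running best
-- (signal, key) pair and computing each key once via a per-tier count list (simpler control flow, same result).


-- ===== PORT A =====
-- _TIERS (tier names kept for fidelity; only the keyword lists are read)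
def pyTiers : List (String × List String) := [
  ("project", ["install", "rooftop", "solar farm", "solar project",
    "completed", "commission", "deploy", "kw", "mw", "megawatt"]),
  ("storage", ["battery", "powerwall", "storage", "bess", "backup power",
    "energy storage", "tesla", "enphase"]),
  ("expansion", ["hiring", "hire", "expanding", "expansion", "join our team",
    "growing", "new office", "new location", "now serving"])]

-- _tier: first tier index whose keyword list has a hit; 99 otherwise
def pyTier (signal : String) : Int :=
  let lower := PySem.Str.lower signal
  match pyTiers.findIdx? (fun t => t.2.any (fun kw => PySem.Str.isIn kw lower)) with
  | some i => (i : Int)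
  | none => 99

-- _keyword_hits: total keyword matches over all tiers
def pyHits (signal : String) : Int :=
  let lower := PySem.Str.lower signal
  pyTiers.foldl (fun acc t => acc + ((t.2.countP (fun kw => PySem.Str.isIn kw lower) : Nat) : Int)) 0

def rank_signals (signals : List String) : Option String :=
  match signals with
  | [] => none
  | s0 :: _ =>
    let candidates := signals.filter (fun s => 3 ≤ (PySem.Str.split₀ s).length)
    if candidates.isEmpty then some s0
    else PySem.List.pyGet?
      (PySem.List.sorted2 candidates pyTier (fun s => -(pyHits s))) 0

-- ===== PORT B =====
-- _key: per-tier hit counts in one pass over the table, then (first tier with a hit or 99, -total hits)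
def altKey (s : String) : Int × Int :=
  let lower := PySem.Str.lower s
  let counts : List Int := pyTiers.map (fun t => ((t.2.countP (fun kw => PySem.Str.isIn kw lower) : Nat) : Int))
  let tier : Int :=
    match counts.findIdx? (fun c => decide (0 < c)) with
    | some i => (i : Int)
    | none => 99
  (tier, -(counts.foldl (· + ·) 0))

-- single pass: filter and running-minimum fused, key computed once per signal
def rank_signals_alt (signals : List String) : Option String :=
  match signals with
  | [] => none
  | s0 :: _ =>
    let r := signals.foldl
      (fun (acc : Option (String × (Int × Int))) s =>
        if 3 ≤ (PySem.Str.split₀ s).length then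
          let k := altKey s
          match acc with
          | none => some (s, k)
          | some bp =>
            if k.1 < bp.2.1 ∨ (k.1 = bp.2.1 ∧ k.2 < bp.2.2) then some (s, k) else acc
        else acc) none
    match r with
    | some bp => some bp.1
    | none => some s0

-- ===== PRECONDITION & SPEC =====
def Spec_rank_signals (signals : List String) (out : Option String) : Prop := out = rank_signals_alt signals
instance (signals : List String) (out : Option String) : Decidable (Spec_rank_signals signals out) := by unfold Spec_rank_signals; infer_instance

-- ===== CLAIM (what is proved, stated in full; the proofs are below) =====
def Claim_equal_rank_signals : Prop := ∀ (signals : List String), Dom_rank_signals signals → Spec_rank_signals signals (rank_signals signals)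

-- ===== LEMMAS AND PROOFS =====

-- the strict tuple-lex comparison used by sorted2's insertion sort
def keyLt (x y : String) : Bool :=
  decide (pyTier x < pyTier y) ||
    (!decide (pyTier y < pyTier x) && decide (-(pyHits x) < -(pyHits y)))

-- a positive count is a hit
theorem decide_count_eq_any (l : List String) (q : String → Bool) :
    (decide (0 < ((l.countP q : Nat) : Int))) = l.any q := by
  by_cases h : ∃ x ∈ l, q x = true
  · have h1 : l.any q = true := List.any_eq_true.mpr h
    simp only [h1]
    simpa using List.countP_pos_iff.mpr h
  · have h1 : l.any q = false := by
      simp only [List.any_eq_false]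
      intro x hx; by_contra hq; exact h ⟨x, hx, by simpa using hq⟩
    have h2 : l.countP q = 0 := by
      rw [List.countP_eq_zero]
      intro x hx; by_contra hq; exact h ⟨x, hx, by simpa using hq⟩
    simp [h1, h2]

-- B's key is exactly A's (tier, -hits)
theorem altKey_eq (s : String) : altKey s = (pyTier s, -(pyHits s)) := by
  have hp : ((fun c : Int => decide (0 < c)) ∘
      (fun t : String × List String =>
        ((t.2.countP (fun kw => PySem.Str.isIn kw (PySem.Str.lower s)) : Nat) : Int))) =
      (fun t : String × List String => t.2.any (fun kw => PySem.Str.isIn kw (PySem.Str.lower s))) :=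
    funext fun t => decide_count_eq_any _ _
  unfold altKey pyTier pyHits
  simp only [List.findIdx?_map, List.foldl_map, hp]

-- B's if-condition agrees with keyLt once the keys are A's (tier, -hits)
theorem keyLt_iff (x b : String) :
    keyLt x b = true ↔
      (pyTier x < pyTier b ∨ (pyTier x = pyTier b ∧ -(pyHits x) < -(pyHits b))) := by
  unfold keyLt
  simp only [Bool.or_eq_true, Bool.and_eq_true, Bool.not_eq_true', decide_eq_true_eq,
    decide_eq_false_iff_not]
  constructor
  · rintro (h | ⟨h1, h2⟩)
    · exact Or.inl h
    · rcases lt_trichotomy (pyTier x) (pyTier b) with h | h | h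
      · exact Or.inl h
      · exact Or.inr ⟨h, h2⟩
      · exact absurd h h1
  · rintro (h | ⟨h1, h2⟩)
    · exact Or.inl h
    · exact Or.inr ⟨by omega, h2⟩

-- B's if-condition agrees with keyLt once the keys are A's (tier, -hits)
theorem step_some (x b : String) :
    (if (altKey x).1 < (altKey b).1 ∨ ((altKey x).1 = (altKey b).1 ∧ (altKey x).2 < (altKey b).2)
     then some (x, altKey x) else some (b, altKey b)) =
    some ((if keyLt x b then x else b), altKey (if keyLt x b then x else b)) := by
  by_cases h : (altKey x).1 < (altKey b).1 ∨ ((altKey x).1 = (altKey b).1 ∧ (altKey x).2 < (altKey b).2)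
  · have hk : keyLt x b = true := by
      rw [keyLt_iff]
      rw [altKey_eq x, altKey_eq b] at h
      exact h
    simp [h, hk]
  · have hk : keyLt x b = false := by
      rw [Bool.eq_false_iff, Ne, keyLt_iff]
      rw [altKey_eq x, altKey_eq b] at h
      exact h
    simp [h, hk]

-- B's fold with a `some` accumulator is the plain running minimum by keyLt
theorem foldB_some (cs : List String) : ∀ (b : String),
    cs.foldl
      (fun (acc : Option (String × (Int × Int))) s =>
        let k := altKey s
        match acc with
        | none => some (s, k)
        | some bp =>
          if k.1 < bp.2.1 ∨ (k.1 = bp.2.1 ∧ k.2 < bp.2.2) then some (s, k) else acc)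
      (some (b, altKey b)) =
    some (cs.foldl (fun best x => if keyLt x best then x else best) b,
      altKey (cs.foldl (fun best x => if keyLt x best then x else best) b)) := by
  induction cs with
  | nil => intro b; rfl
  | cons x xs ih =>
    intro b
    simp only [List.foldl_cons]
    rw [step_some x b] at *
    exact ih _

-- head of an insertion: the new element lands in front iff it beats the old head
theorem head?_insertBy {α : Type} (lt : α → α → Bool) (x : α) (acc : List α) :
    (PySem.List.insertBy lt x acc).head? =
      some (match acc with | [] => x | y :: _ => if lt x y then x else y) := by
  cases acc with
  | nil => rfl
  | cons y ys =>
    simp only [PySem.List.insertBy]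
    split <;> simp

-- the head of an insertion-sort fold evolves exactly like a running-minimum fold
theorem head?_foldl_insertBy {α : Type} (lt : α → α → Bool) (xs : List α) :
    ∀ (acc : List α),
      (xs.foldl (fun a x => PySem.List.insertBy lt x a) acc).head? =
        xs.foldl (fun m x =>
          match m with
          | none => some x
          | some m => some (if lt x m then x else m)) acc.head? := by
  induction xs with
  | nil => intro acc; rfl
  | cons x xs ih =>
    intro acc
    simp only [List.foldl_cons]
    rw [ih, head?_insertBy]
    cases acc <;> rfl

-- an option-valued running minimum started at `some c` is the plain running minimum
theorem foldl_min_some {α : Type} (lt : α → α → Bool) (cs : List α) :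
    ∀ (c : α),
      cs.foldl (fun m x =>
          match m with
          | none => some x
          | some m => some (if lt x m then x else m)) (some c) =
        some (cs.foldl (fun best x => if lt x best then x else best) c) := by
  induction cs with
  | nil => intro c; rfl
  | cons y ys ih => intro c; simp only [List.foldl_cons]; exact ih _

-- B's full fold over the raw signal list is the fold over the filtered candidates
theorem foldB_filter (signals : List String) :
    signals.foldl
      (fun (acc : Option (String × (Int × Int))) s =>
        if 3 ≤ (PySem.Str.split₀ s).length then
          let k := altKey s
          match acc with
          | none => some (s, k)
          | some bp =>
            if k.1 < bp.2.1 ∨ (k.1 = bp.2.1 ∧ k.2 < bp.2.2) then some (s, k) else acc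
        else acc) none =
    (signals.filter (fun s => 3 ≤ (PySem.Str.split₀ s).length)).foldl
      (fun (acc : Option (String × (Int × Int))) s =>
        let k := altKey s
        match acc with
        | none => some (s, k)
        | some bp =>
          if k.1 < bp.2.1 ∨ (k.1 = bp.2.1 ∧ k.2 < bp.2.2) then some (s, k) else acc)
      none := by
  rw [List.foldl_filter]
  simp only [decide_eq_true_eq]

-- ===== VERDICT (by name: the statement is the Claim_ definition above) =====
theorem rank_signals_spec : Claim_equal_rank_signals := by
  intro signals _
  unfold Spec_rank_signals rank_signals rank_signals_alt
  cases signals with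
  | nil => rfl
  | cons s0 rest =>
    simp only
    rw [foldB_filter]
    cases hc : (s0 :: rest).filter (fun s => 3 ≤ (PySem.Str.split₀ s).length) with
    | nil => simp
    | cons c cs =>
      -- B side: the fused fold is the running minimum over the candidates
      have hB := foldB_some cs c
      -- A side: the head of the sorted list is the same running minimum
      have hA :
          ((PySem.List.sorted2 ((s0 :: rest).filter (fun s => 3 ≤ (PySem.Str.split₀ s).length))
              pyTier (fun s => -(pyHits s))).head?) =
            some (cs.foldl (fun best x => if keyLt x best then x else best) c) := by
        rw [hc]
        have h := head?_foldl_insertBy keyLt (c :: cs) []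
        simp only [List.head?_nil] at h
        have heq : (PySem.List.sorted2 (c :: cs) pyTier (fun s => -(pyHits s))) =
            (c :: cs).foldl (fun a x => PySem.List.insertBy keyLt x a) [] := by
          simp only [PySem.List.sorted2]
          rfl
        rw [heq, h]
        simp only [List.foldl_cons]
        exact foldl_min_some keyLt cs c
      rcases hs : (PySem.List.sorted2 ((s0 :: rest).filter (fun s => 3 ≤ (PySem.Str.split₀ s).length))
          pyTier (fun s => -(pyHits s))) with _ | ⟨b, t⟩
      · rw [hs] at hA; simp at hA
      · rw [hs] at hA
        simp only [List.head?_cons, Option.some.injEq] at hA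
        rw [hc] at hs
        simp only [List.foldl_cons] at hB ⊢
        rw [hB]
        simp [PySem.List.pyGet?, PySem.List.pyIdx?, hs, hA]
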